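-- pv_equiv track=rewrite | github.com/darkcleopas/table-scanner | src/utils.py | find_movement
-- ===== SOURCE A (Python) =====
-- def find_movement(slices):
-- 	values = list(slices.values())
-- 	if values.count("current") > 1 or values.count("target") > 1:
-- 		return "none"
-- 	from_ = ""
-- 	to_ = ""
-- 	for key, value in slices.items():
-- 		if value == "current":
-- 			from_ = key
-- 		elif value == "target":
-- 			to_ = key
--
-- 	if from_ != "" and to_ != "":
-- 		return from_ + to_
-- 	else:
-- 		return "none"
-- ===== SOURCE B (Python) =====
-- def find_movement(slices):
--     cur = None
--     tgt = None
--     for key, value in slices.items():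
--         if value == "current":
--             if cur is not None:
--                 return "none"
--             cur = key
--         elif value == "target":
--             if tgt is not None:
--                 return "none"
--             tgt = key
--     from_ = cur if cur is not None else ""
--     to_ = tgt if tgt is not None else ""
--     return from_ + to_ if from_ != "" and to_ != "" else "none"
-- ===== Notes on version B (the rewrite author's own statement) =====
-- stated objective: alternative
-- what changed: Replaces A's counting passes over values plus a relabelling loop with a single short-circuiting pass keeping optional first-occurrence accumulators and returning 'none' the moment a second 'current' or 'target' is seen.
import Mathlib
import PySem

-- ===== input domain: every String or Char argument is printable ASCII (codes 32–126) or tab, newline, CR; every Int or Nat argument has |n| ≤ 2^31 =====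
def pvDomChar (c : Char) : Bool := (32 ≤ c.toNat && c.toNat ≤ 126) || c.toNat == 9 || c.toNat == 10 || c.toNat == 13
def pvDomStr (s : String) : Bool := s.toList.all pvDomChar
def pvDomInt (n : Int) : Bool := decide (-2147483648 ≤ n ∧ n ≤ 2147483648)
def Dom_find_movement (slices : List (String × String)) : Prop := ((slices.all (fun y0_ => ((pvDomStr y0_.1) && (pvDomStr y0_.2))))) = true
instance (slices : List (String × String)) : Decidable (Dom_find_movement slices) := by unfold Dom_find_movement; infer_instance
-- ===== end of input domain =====

-- B replaces A's two count() passes + relabelling loop with one short-circuiting pass over the items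
-- that keeps optional first-occurrence accumulators and aborts on a duplicate; alternative decomposition, same behaviour.

-- ===== PORT A =====
def find_movement (slices : List (String × String)) : String :=
  let values := slices.map Prod.snd
  if PySem.List.count values "current" > 1 || PySem.List.count values "target" > 1 then "none"
  else
    let ft := slices.foldl (fun ft kv =>
      if kv.2 == "current" then (kv.1, ft.2)
      else if kv.2 == "target" then (ft.1, kv.1)
      else ft) ("", "")
    if ft.1 != "" && ft.2 != "" then ft.1 ++ ft.2 else "none"

-- ===== PORT B =====
-- the early-returning for-loop of Source B: none = the loop returned "none" early
def find_movement_loop (slices : List (String × String)) (cur tgt : Option String) :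
    Option (Option String × Option String) :=
  match slices with
  | [] => some (cur, tgt)
  | kv :: rest =>
    if kv.2 == "current" then
      match cur with
      | some _ => none
      | none => find_movement_loop rest (some kv.1) tgt
    else if kv.2 == "target" then
      match tgt with
      | some _ => none
      | none => find_movement_loop rest cur (some kv.1)
    else find_movement_loop rest cur tgt

def find_movement_alt (slices : List (String × String)) : String :=
  match find_movement_loop slices none none with
  | none => "none"
  | some (cur, tgt) =>
    let from_ := cur.getD ""
    let to_ := tgt.getD ""
    if from_ != "" && to_ != "" then from_ ++ to_ else "none"

-- ===== PRECONDITION & SPEC =====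
def Spec_find_movement (slices : List (String × String)) (out : String) : Prop := out = find_movement_alt slices
instance (slices : List (String × String)) (out : String) : Decidable (Spec_find_movement slices out) := by unfold Spec_find_movement; infer_instance

-- ===== CLAIM (what is proved, stated in full; the proofs are below) =====
def Claim_equal_find_movement : Prop := ∀ (slices : List (String × String)), Dom_find_movement slices → Spec_find_movement slices (find_movement slices)

-- ===== LEMMAS AND PROOFS =====

-- keys whose value is v, in order
def pvKeysFor (v : String) (slices : List (String × String)) : List String :=
  (slices.filter (fun kv => kv.2 == v)).map Prod.fst

theorem pvKeysFor_cons (v : String) (kv : String × String) (rest : List (String × String)) :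
    pvKeysFor v (kv :: rest) =
      if kv.2 = v then kv.1 :: pvKeysFor v rest else pvKeysFor v rest := by
  simp only [pvKeysFor, List.filter_cons]
  by_cases h : kv.2 = v <;> simp [h]

theorem pv_count_eq (v : String) (slices : List (String × String))  :
    PySem.List.count (slices.map Prod.snd) v = (pvKeysFor v slices).length := by
  induction slices with
  | nil => simp [pvKeysFor, PySem.List.count]
  | cons kv rest ih =>
    rw [pvKeysFor_cons]
    by_cases h : kv.2 = v <;>
      simp [PySem.List.count, h] at ih ⊢ <;> omega

theorem pv_foldA (slices : List (String × String)) (f t : String) :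
    slices.foldl (fun ft kv =>
      if kv.2 == "current" then (kv.1, ft.2)
      else if kv.2 == "target" then (ft.1, kv.1)
      else ft) (f, t)
    = ((pvKeysFor "current" slices).getLastD f, (pvKeysFor "target" slices).getLastD t) := by
  induction slices generalizing f t with
  | nil => simp [pvKeysFor]
  | cons kv rest ih =>
    simp only [List.foldl_cons, pvKeysFor_cons]
    by_cases hc : kv.2 = "current"
    · have ht : ¬ kv.2 = "target" := by rw [hc]; decide
      have hcb : (kv.2 == "current") = true := by simp [hc]
      simp only [hcb, if_true, if_pos hc, if_neg ht]
      rw [ih, List.getLastD_cons]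
    · by_cases ht : kv.2 = "target"
      · have hcb : (kv.2 == "current") = false := by simp [hc]
        have htb : (kv.2 == "target") = true := by simp [ht]
        simp only [hcb, htb, Bool.false_eq_true, if_false, if_true, if_neg hc, if_pos ht]
        rw [ih, List.getLastD_cons]
      · have hcb : (kv.2 == "current") = false := by simp [hc]
        have htb : (kv.2 == "target") = false := by simp [ht]
        simp only [hcb, htb, Bool.false_eq_true, if_false, if_neg hc, if_neg ht]
        rw [ih]

-- characterisation of B's loop: abort iff some combined occurrence list exceeds one element,
-- otherwise return the (unique) heads
theorem pv_loopB (slices : List (String × String)) (c t : Option String) :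
    find_movement_loop slices c t =
      if (c.toList ++ pvKeysFor "current" slices).length ≤ 1 ∧
         (t.toList ++ pvKeysFor "target" slices).length ≤ 1
      then some ((c.toList ++ pvKeysFor "current" slices).head?,
                 (t.toList ++ pvKeysFor "target" slices).head?)
      else none := by
  induction slices generalizing c t with
  | nil =>
    cases c <;> cases t <;> simp [find_movement_loop, pvKeysFor]
  | cons kv rest ih =>
    simp only [pvKeysFor_cons, find_movement_loop]
    by_cases hc : kv.2 = "current"
    · have ht : ¬ kv.2 = "target" := by rw [hc]; decide
      have hcb : (kv.2 == "current") = true := by simp [hc]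
      simp only [hcb, if_true, if_pos hc, if_neg ht]
      cases c with
      | some x =>
        simp
      | none =>
        rw [ih]
        simp
    · by_cases ht : kv.2 = "target"
      · have hcb : (kv.2 == "current") = false := by simp [hc]
        have htb : (kv.2 == "target") = true := by simp [ht]
        simp only [hcb, htb, Bool.false_eq_true, if_false, if_true, if_neg hc, if_pos ht]
        cases t with
        | some x =>
          simp
        | none =>
          rw [ih]
          simp
      · have hcb : (kv.2 == "current") = false := by simp [hc]
        have htb : (kv.2 == "target") = false := by simp [ht]
        simp only [hcb, htb, Bool.false_eq_true, if_false, if_neg hc, if_neg ht]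
        rw [ih]

-- for a list of length ≤ 1, last-with-default = head-with-default
theorem pv_short_last (l : List String) (h : l.length ≤ 1) :
    l.getLastD "" = l.head?.getD "" := by
  match l, h with
  | [], _ => rfl
  | [x], _ => rfl

-- ===== VERDICT (by name: the statement is the Claim_ definition above) =====
theorem find_movement_spec : Claim_equal_find_movement := by
  intro slices _
  unfold Spec_find_movement find_movement find_movement_alt
  dsimp only
  rw [pv_loopB, pv_foldA, pv_count_eq, pv_count_eq]
  set cur := pvKeysFor "current" slices with hcur
  set tgt := pvKeysFor "target" slices with htgt
  simp only [Option.toList_none, List.nil_append]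
  by_cases h1 : cur.length ≤ 1
  · by_cases h2 : tgt.length ≤ 1
    · have hA : ¬ (cur.length > 1 || tgt.length > 1) = true := by
        simp; omega
      have hp : cur.length ≤ 1 ∧ tgt.length ≤ 1 := ⟨h1, h2⟩
      rw [if_neg hA, if_pos hp, pv_short_last cur h1, pv_short_last tgt h2]
    · have hA : (cur.length > 1 || tgt.length > 1) = true := by simp; omega
      rw [if_pos hA, if_neg (by tauto)]
  · have hA : (cur.length > 1 || tgt.length > 1) = true := by simp; omega
    rw [if_pos hA, if_neg (by tauto)]
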